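-- pv_equiv track=rewrite | github.com/VinitHa44/mock-data-generator | backend/src/app/services/image_enrichment_service.py | _generate_keyword_combinations
-- ===== SOURCE A (Python) =====
-- from typing import Any, Dict, List, Optional, Tuple
-- from itertools import combinations
--
-- def _generate_keyword_combinations(keywords: List[str]) -> List[str]:
--     """
--     Generates keyword combinations in sequential fallback order:
--     1. All keywords together
--     2. First combination of (n-1) keywords
--     3. Second combination of (n-1) keywords
--     4. ... all (n-1) combinations
--     5. First combination of (n-2) keywords
--     6. Second combination of (n-2) keywords
--     7. ... and so on until single keywords
--     """
--     combinations_list = []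
--     n = len(keywords)
--
--     if not keywords:
--         return combinations_list
--
--     # Add all keywords together first
--     combinations_list.append(" ".join(keywords))
--
--     # Generate combinations from largest to smallest, maintaining order
--     for r in range(n - 1, 0, -1):
--         # Convert combinations iterator to list to maintain order
--         r_combinations = list(combinations(keywords, r))
--         for combo in r_combinations:
--             combinations_list.append(" ".join(combo))
--
--     return combinations_list
-- ===== SOURCE B (Python) =====
-- def _generate_keyword_combinations(keywords):
--     # Build the whole powerset in one pass (prefix-first recursive order),
--     # then emit size buckets from largest to smallest.
--     if not keywords:
--         return []
--     subsets = [[]]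
--     for kw in reversed(keywords):
--         subsets = [[kw] + s for s in subsets] + subsets
--     n = len(keywords)
--     return [" ".join(s) for r in range(n, 0, -1) for s in subsets if len(s) == r]
-- ===== Notes on version B (the rewrite author's own statement) =====
-- stated objective: alternative
-- what changed: Instead of re-enumerating itertools.combinations separately for every size r, B builds the full powerset once in a single accumulating pass (prefix-first recursive order) and then emits the size buckets from largest to smallest.
import Mathlib
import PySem

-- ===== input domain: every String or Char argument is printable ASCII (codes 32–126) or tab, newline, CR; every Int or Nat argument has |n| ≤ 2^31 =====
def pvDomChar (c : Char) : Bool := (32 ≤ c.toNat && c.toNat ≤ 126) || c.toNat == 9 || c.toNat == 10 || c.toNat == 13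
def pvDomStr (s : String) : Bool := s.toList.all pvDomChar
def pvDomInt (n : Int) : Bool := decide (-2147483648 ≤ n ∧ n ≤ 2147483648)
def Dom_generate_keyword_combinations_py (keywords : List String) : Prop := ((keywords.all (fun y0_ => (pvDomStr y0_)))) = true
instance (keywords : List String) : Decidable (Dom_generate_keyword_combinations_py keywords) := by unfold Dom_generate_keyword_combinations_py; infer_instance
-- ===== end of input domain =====

-- B replaces A's per-size itertools.combinations enumeration with one powerset pass plus size bucketing (objective: alternative).

-- ===== PORT A =====
-- itertools.combinations(keywords, r), transliterated structurally (lexicographic-by-index order)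
def pvComb : Nat → List String → List (List String)
  | 0, _ => [[]]
  | _+1, [] => []
  | r+1, x :: xs => (pvComb r xs).map (fun c => x :: c) ++ pvComb (r+1) xs

def generate_keyword_combinations_py (keywords : List String) : List String :=
  let n : Int := keywords.length
  if keywords = [] then []
  else
    (PySem.List.pyRange (n - 1) 0 (-1)).foldl
      (fun acc r => acc ++ (pvComb r.toNat keywords).map (fun combo => PySem.Str.join " " combo))
      [PySem.Str.join " " keywords]

-- ===== PORT B =====
-- subsets = [[]]; for kw in reversed(keywords): subsets = [[kw]+s for s in subsets] + subsets
def pvSubsets (keywords : List String) : List (List String) :=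
  keywords.foldr (fun kw acc => acc.map (fun s => kw :: s) ++ acc) [[]]

def generate_keyword_combinations_py_alt (keywords : List String) : List String :=
  if keywords = [] then []
  else
    let subsets := pvSubsets keywords
    (PySem.List.pyRange (keywords.length : Int) 0 (-1)).flatMap
      (fun r => (subsets.filter (fun s => (s.length : Int) == r)).map
        (fun s => PySem.Str.join " " s))

-- ===== PRECONDITION & SPEC =====
def Spec_generate_keyword_combinations_py (keywords : List String) (out : List String) : Prop := out = generate_keyword_combinations_py_alt keywords
instance (keywords : List String) (out : List String) : Decidable (Spec_generate_keyword_combinations_py keywords out) := by unfold Spec_generate_keyword_combinations_py; infer_instance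

-- ===== CLAIM (what is proved, stated in full; the proofs are below) =====
def Claim_equal_generate_keyword_combinations_py : Prop := ∀ (keywords : List String), Dom_generate_keyword_combinations_py keywords → Spec_generate_keyword_combinations_py keywords (generate_keyword_combinations_py keywords)

-- ===== LEMMAS AND PROOFS =====

-- combinations of size > length are empty
theorem pvComb_eq_nil (l : List String) : ∀ r, l.length < r → pvComb r l = [] := by
  induction l with
  | nil => intro r h; cases r with
    | zero => omega
    | succ k => rfl
  | cons x xs ih =>
    intro r h
    cases r with
    | zero => omega
    | succ k =>
      simp only [pvComb]
      rw [ih k (by simp at h; omega), ih (k+1) (by simp at h; omega)]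
      simp

-- the only combination of full size is the list itself
theorem pvComb_full (l : List String) : pvComb l.length l = [l] := by
  induction l with
  | nil => rfl
  | cons x xs ih =>
    simp only [List.length_cons, pvComb]
    rw [ih, pvComb_eq_nil xs (xs.length + 1) (by omega)]
    simp

-- bucketing the powerset by size r recovers combinations order
theorem filter_pvSubsets (l : List String) : ∀ r : Nat,
    (pvSubsets l).filter (fun s => (s.length : Int) == (r : Int)) = pvComb r l := by
  induction l with
  | nil =>
    intro r
    cases r with
    | zero => rfl
    | succ k => simp [pvSubsets, pvComb]; omega
  | cons x xs ih =>
    intro r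
    simp only [pvSubsets, List.foldr_cons] at *
    rw [List.filter_append, List.filter_map]
    cases r with
    | zero =>
      have h1 : ((pvSubsets xs).filter
          ((fun s => (s.length : Int) == ((0:Nat) : Int)) ∘ (fun s => x :: s))) = [] := by
        apply List.filter_eq_nil_iff.mpr
        intro s _
        simp; omega
      simp only [pvSubsets] at h1
      rw [h1, ih 0]
      simp [pvComb]
    | succ k =>
      have h1 : ((pvSubsets xs).filter
          ((fun s => (s.length : Int) == ((k+1:Nat) : Int)) ∘ (fun s => x :: s))) =
          (pvSubsets xs).filter (fun s => (s.length : Int) == (k : Int)) := by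
        apply List.filter_congr
        intro s _
        simp only [Function.comp, List.length_cons]
        rw [Bool.eq_iff_iff, beq_iff_eq, beq_iff_eq]
        push_cast
        omega
      simp only [pvSubsets] at h1
      rw [h1, ih k, ih (k+1)]
      rfl

-- ===== VERDICT (by name: the statement is the Claim_ definition above) =====
theorem generate_keyword_combinations_py_spec : Claim_equal_generate_keyword_combinations_py := by
  intro keywords _
  unfold Spec_generate_keyword_combinations_py
  unfold generate_keyword_combinations_py generate_keyword_combinations_py_alt
  by_cases hk : keywords = []
  · simp [hk]
  · simp only [hk, ite_false]
    obtain ⟨m, hm⟩ : ∃ m, keywords.length = m + 1 := by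
      cases keywords with
      | nil => exact absurd rfl hk
      | cons a as => exact ⟨as.length, by simp⟩
    rw [PySem.List.foldl_append_eq_flatMap]
    rw [PySem.List.pyRange_neg_one, PySem.List.pyRange_neg_one]
    have ht1 : ((keywords.length : Int) - 1 - 0).toNat = m := by omega
    have ht2 : ((keywords.length : Int) - 0).toNat = m + 1 := by omega
    rw [ht1, ht2, List.flatMap_map, List.flatMap_map]
    rw [List.range_succ_eq_map, List.flatMap_cons, List.flatMap_map]
    have hb0 : (pvSubsets keywords).filter
        (fun s => (s.length : Int) == ((keywords.length : Int) - ((0:Nat) : Int))) = [keywords] := by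
      have : ((keywords.length : Int) - ((0:Nat) : Int)) = ((keywords.length : Nat) : Int) := by
        push_cast; ring
      rw [this, filter_pvSubsets keywords keywords.length, pvComb_full]
    rw [hb0]
    simp only [List.map_cons, List.map_nil, Nat.succ_eq_add_one]
    congr 1
    apply List.flatMap_congr
    intro k hkmem
    have hklt : k < m := List.mem_range.mp hkmem
    have hA : (((keywords.length : Int) - 1 - (k : Int))).toNat = m - k := by omega
    have hB : ((keywords.length : Int) - ((k + 1 : Nat) : Int)) = ((m - k : Nat) : Int) := by
      push_cast; omega
    rw [hA, hB, filter_pvSubsets keywords (m - k)]
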